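-- pv_equiv track=rewrite | github.com/dudekkatarzyna/Choosing-Technological-Proces | cta/resource_configurations_manager.py | _can_decrease_on_right
-- ===== SOURCE A (Python) =====
-- from typing import List
--
-- def _can_decrease_on_right(x: List[int], index) -> bool:
--     copy_x = x[index + 1: len(x) - 1]
--     x_sum = 0
--
--     for val in copy_x:
--         x_sum += val
--         if x_sum:
--             return True
--
--     return False
-- ===== SOURCE B (Python) =====
-- from typing import List
--
-- def _can_decrease_on_right(x: List[int], index) -> bool:
--     # The running prefix sum in A stays 0 until the first nonzero element,
--     # so the loop returns True iff the slice contains any nonzero value.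
--     return any(val != 0 for val in x[index + 1: len(x) - 1])
-- ===== Notes on version B (the rewrite author's own statement) =====
-- stated objective: simpler
-- what changed: Replaces the prefix-sum accumulator with early return by a direct existence test: the slice's running sum first becomes nonzero exactly at its first nonzero element, so the function is any(val != 0) over the slice.
import Mathlib
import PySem

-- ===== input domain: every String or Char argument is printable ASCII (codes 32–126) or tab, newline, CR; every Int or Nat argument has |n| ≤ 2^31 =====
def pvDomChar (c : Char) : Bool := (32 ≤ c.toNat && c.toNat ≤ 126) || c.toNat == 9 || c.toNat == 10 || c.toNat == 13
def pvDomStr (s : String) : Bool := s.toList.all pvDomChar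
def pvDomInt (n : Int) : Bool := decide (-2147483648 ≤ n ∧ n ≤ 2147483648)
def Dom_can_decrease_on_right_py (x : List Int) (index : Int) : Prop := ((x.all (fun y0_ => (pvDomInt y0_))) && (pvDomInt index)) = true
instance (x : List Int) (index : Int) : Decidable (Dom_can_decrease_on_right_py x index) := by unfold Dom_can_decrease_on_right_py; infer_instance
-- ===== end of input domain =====

-- B replaces A's running prefix-sum accumulator with a direct 'any element nonzero' test (simpler).

-- ===== PORT A =====
-- A's loop: accumulate x_sum, return True as soon as it is truthy (nonzero).
def canDecLoopA : List Int → Int → Bool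
  | [], _ => false
  | v :: t, s =>
    let s' := s + v
    if s' ≠ 0 then true else canDecLoopA t s'

def can_decrease_on_right_py (x : List Int) (index : Int) : Bool :=
  let copy_x := PySem.List.slice x (some (index + 1)) (some ((x.length : Int) - 1))
  canDecLoopA copy_x 0

-- ===== PORT B =====
def can_decrease_on_right_py_alt (x : List Int) (index : Int) : Bool :=
  (PySem.List.slice x (some (index + 1)) (some ((x.length : Int) - 1))).any (fun v => v ≠ 0)

-- ===== PRECONDITION & SPEC =====
def Spec_can_decrease_on_right_py (x : List Int) (index : Int) (out : Bool) : Prop := out = can_decrease_on_right_py_alt x index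
instance (x : List Int) (index : Int) (out : Bool) : Decidable (Spec_can_decrease_on_right_py x index out) := by unfold Spec_can_decrease_on_right_py; infer_instance

-- ===== CLAIM (what is proved, stated in full; the proofs are below) =====
def Claim_equal_can_decrease_on_right_py : Prop := ∀ (x : List Int) (index : Int), Dom_can_decrease_on_right_py x index → Spec_can_decrease_on_right_py x index (can_decrease_on_right_py x index)

-- ===== LEMMAS AND PROOFS =====
-- From a zero accumulator, A's loop is exactly an existence test for a nonzero element.
theorem canDecLoopA_zero (l : List Int) : canDecLoopA l 0 = l.any (fun v => v ≠ 0) := by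
  induction l with
  | nil => rfl
  | cons v t ih =>
    by_cases h : v = 0
    · subst h; simpa [canDecLoopA] using ih
    · simp [canDecLoopA, h]

-- ===== VERDICT (by name: the statement is the Claim_ definition above) =====
theorem can_decrease_on_right_py_spec : Claim_equal_can_decrease_on_right_py := by
  intro x index _
  unfold Spec_can_decrease_on_right_py can_decrease_on_right_py can_decrease_on_right_py_alt
  exact canDecLoopA_zero _
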